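-- pv_equiv track=rewrite | github.com/lucassantx/Lista-de-exercicios | Lista13(mat).py | transformar_matriz_triangular_inferior
-- ===== SOURCE A (Python) =====
-- def transformar_matriz_triangular_inferior(matriz):
--     triangular_inferior = []
--     for i in range(4):
--         linha = []
--         for j in range(4):
--             if j > i:
--                 linha.append(0)
--             else:
--                 linha.append(matriz[i][j])
--         triangular_inferior.append(linha)
--     return triangular_inferior
-- ===== SOURCE B (Python) =====
-- def transformar_matriz_triangular_inferior(matriz):
--     colunas = []
--     for j in range(4):
--         colunas.append([0] * j + [matriz[i][j] for i in range(j, 4)])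
--     return [list(linha) for linha in zip(*colunas)]
-- ===== Notes on version B (the rewrite author's own statement) =====
-- stated objective: alternative
-- what changed: Traverses the matrix column-major: builds each output column (j leading zeros then the below-diagonal entries of original column j) and transposes the columns with zip(*...), instead of A's row-major per-cell j>i branch.
import Mathlib
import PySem

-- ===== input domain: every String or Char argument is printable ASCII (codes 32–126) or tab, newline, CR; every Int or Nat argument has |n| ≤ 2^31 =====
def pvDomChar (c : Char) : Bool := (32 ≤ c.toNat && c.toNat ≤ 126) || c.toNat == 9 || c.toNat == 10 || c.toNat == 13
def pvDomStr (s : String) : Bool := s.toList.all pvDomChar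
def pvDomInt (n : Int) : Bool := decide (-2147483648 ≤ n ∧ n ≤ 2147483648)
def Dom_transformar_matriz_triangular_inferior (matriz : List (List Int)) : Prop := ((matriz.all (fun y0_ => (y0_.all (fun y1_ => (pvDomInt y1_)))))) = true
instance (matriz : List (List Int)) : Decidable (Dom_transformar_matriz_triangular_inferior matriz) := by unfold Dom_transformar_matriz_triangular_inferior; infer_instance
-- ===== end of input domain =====

-- B traverses column-major: it builds each output column (j leading zeros, then the
-- below-diagonal entries of original column j) and transposes with zip(*...); objective: alternative.

-- ===== PORT A =====
def transformar_matriz_triangular_inferior (matriz : List (List Int)) : List (List Int) :=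
  (PySem.List.pyRange 0 4 1).foldl (fun tri i =>
    tri ++ [(PySem.List.pyRange 0 4 1).foldl (fun linha j =>
      linha ++ [if i < j then 0 else PySem.List.pyGetD (PySem.List.pyGetD matriz i []) j 0]) []]) []

-- ===== PORT B =====
-- faithful port of Python's zip(*cols): take heads while every list is nonempty
def pvZipStar (cols : List (List Int)) : List (List Int) :=
  if _h : cols ≠ [] ∧ cols.all (fun c => !c.isEmpty) then
    (cols.map (fun c => c.headD 0)) :: pvZipStar (cols.map List.tail)
  else []
termination_by (cols.headD []).length
decreasing_by
  obtain ⟨hne, hall⟩ := _h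
  match cols, hne with
  | c :: cs, _ =>
    simp only [List.all_cons, Bool.and_eq_true, Bool.not_eq_true', List.isEmpty_eq_false_iff] at hall
    simp only [List.headD_cons]
    cases c with
    | nil => exact absurd rfl hall.1
    | cons x xs => simp

def transformar_matriz_triangular_inferior_alt (matriz : List (List Int)) : List (List Int) :=
  let colunas := (PySem.List.pyRange 0 4 1).foldl (fun cols j =>
    cols ++ [List.replicate j.toNat 0 ++
      (PySem.List.pyRange j 4 1).map (fun i => PySem.List.pyGetD (PySem.List.pyGetD matriz i []) j 0)]) []
  pvZipStar colunas

-- ===== PRECONDITION & SPEC =====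
-- Pre_ excludes exactly the inputs where A raises IndexError: fewer than 4 rows, or a
-- row i < 4 shorter than i+1 entries (A reads matriz[i][j] for every j ≤ i < 4).
def Pre_transformar_matriz_triangular_inferior (matriz : List (List Int)) : Prop :=
  4 ≤ matriz.length ∧ ∀ i : Nat, i < 4 → i < (matriz.getD i []).length
instance (matriz : List (List Int)) : Decidable (Pre_transformar_matriz_triangular_inferior matriz) := by unfold Pre_transformar_matriz_triangular_inferior; infer_instance

def pvWitness_transformar_matriz_triangular_inferior : List (List Int) :=
  [[1, 2, 3, 4], [5, 6, 7, 8], [9, 10, 11, 12], [13, 14, 15, 16]]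

def Spec_transformar_matriz_triangular_inferior (matriz : List (List Int)) (out : List (List Int)) : Prop := out = transformar_matriz_triangular_inferior_alt matriz
instance (matriz : List (List Int)) (out : List (List Int)) : Decidable (Spec_transformar_matriz_triangular_inferior matriz out) := by unfold Spec_transformar_matriz_triangular_inferior; infer_instance

-- ===== CLAIM (what is proved, stated in full; the proofs are below) =====
def Claim_equal_transformar_matriz_triangular_inferior : Prop := ∀ (matriz : List (List Int)), Dom_transformar_matriz_triangular_inferior matriz → Pre_transformar_matriz_triangular_inferior matriz → Spec_transformar_matriz_triangular_inferior matriz (transformar_matriz_triangular_inferior matriz)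

-- ===== LEMMAS AND PROOFS =====

-- ===== VERDICT (by name: the statement is the Claim_ definition above) =====
theorem transformar_matriz_triangular_inferior_spec : Claim_equal_transformar_matriz_triangular_inferior := by
  intro m _ hpre
  obtain ⟨hlen, hrow⟩ := hpre
  match m, hlen with
  | a :: b :: c :: d :: rest, _ =>
    have ha := hrow 0 (by norm_num)
    have hb := hrow 1 (by norm_num)
    have hc := hrow 2 (by norm_num)
    have hd := hrow 3 (by norm_num)
    simp only [List.getD] at ha hb hc hd
    match a, ha with
    | a0 :: ta, _ =>
    match b, hb with
    | b0 :: b1 :: tb, _ =>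
    match c, hc with
    | c0 :: c1 :: c2 :: tc, _ =>
    match d, hd with
    | d0 :: d1 :: d2 :: d3 :: td, _ =>
      show Spec_transformar_matriz_triangular_inferior _ _
      unfold Spec_transformar_matriz_triangular_inferior
      unfold transformar_matriz_triangular_inferior transformar_matriz_triangular_inferior_alt
      have h0 : PySem.List.pyRange 0 4 1 = [0, 1, 2, 3] := by decide
      have h1 : PySem.List.pyRange 1 4 1 = [1, 2, 3] := by decide
      have h2 : PySem.List.pyRange 2 4 1 = [2, 3] := by decide
      have h3 : PySem.List.pyRange 3 4 1 = [3] := by decide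
      rw [h0]
      simp only [h0, h1, h2, h3, List.foldl, List.nil_append, List.cons_append,
        List.map_cons, List.map_nil, PySem.List.pyGetD_ofNat']
      simp [pvZipStar.eq_def, List.getD]
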